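-- pv_equiv track=rewrite | github.com/Aru-slave/java-programming | 프로그래머스/lv2/131704. 택배상자/택배상자.py | solution
-- ===== SOURCE A (Python) =====
-- def solution(order):
--     answer = 0
--     subContainer = []  # 정렬 순서를 맞추지 않은 상자 번호들을 저장하는 리스트
--     i = 0  # order 리스트를 탐색하기 위한 인덱스
--
--     # 주요 루프: order 처리
--     while i != len(order):
--         subContainer.append(i + 1)  # 다음 상자 번호를 subContainer에 추가합니다.
--
--         # subContainer의 마지막 상자 번호가 기대하는 순서와 일치하는지 확인
--         while subContainer and subContainer[-1] == order[answer]: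
--             answer += 1  # 올바른 순서의 상자 개수를 증가시킵니다.
--             subContainer.pop()  # 처리된 상자 번호를 subContainer에서 제거합니다.
--
--         i += 1  # 다음 상자 번호로 이동합니다.
--
--     return answer  # 올바른 순서의 상자 개수를 반환합니다.
-- ===== SOURCE B (Python) =====
-- def solution(order):
--     n = len(order)
--     count = 0
--     next_box = 1
--     stack = []
--     for target in order:
--         if stack and stack[-1] == target:
--             stack.pop()
--             count += 1
--             continue
--         while next_box <= n and (not stack or stack[-1] != target):
--             stack.append(next_box)
--             next_box += 1
--         if stack and stack[-1] == target:
--             stack.pop()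
--             count += 1
--         else:
--             break
--     return count
-- ===== Notes on version B (the rewrite author's own statement) =====
-- stated objective: alternative
-- what changed: B drives the outer loop over the order targets with a next-box counter (pushing boxes only on demand and breaking at the first undeliverable target) instead of A's loop over all incoming box numbers with an inner pop loop; same O(n) stack simulation, differently decomposed.
import Mathlib
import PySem

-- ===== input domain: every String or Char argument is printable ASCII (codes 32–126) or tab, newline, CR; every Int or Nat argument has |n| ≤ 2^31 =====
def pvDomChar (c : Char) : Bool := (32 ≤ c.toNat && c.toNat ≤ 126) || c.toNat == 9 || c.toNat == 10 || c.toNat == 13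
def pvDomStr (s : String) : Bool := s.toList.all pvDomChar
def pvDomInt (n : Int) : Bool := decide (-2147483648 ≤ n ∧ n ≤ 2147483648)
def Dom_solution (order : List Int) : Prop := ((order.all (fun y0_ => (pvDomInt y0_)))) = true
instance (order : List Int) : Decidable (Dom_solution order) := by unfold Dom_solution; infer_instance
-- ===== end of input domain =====

-- B drives the loop over the order targets with a next-box counter (pushing only on demand and
-- stopping at the first undeliverable target) instead of A's loop over all incoming boxes; same cost,
-- different decomposition ("alternative").

-- ===== PORT A =====
-- inner while loop of A: pop while the stack top equals order[answer]
def aInner (order : List Int) : List Int → Int → List Int × Int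
  | [], ans => ([], ans)
  | x :: s, ans =>
    if PySem.List.pyGet? order ans = some x then aInner order s (ans + 1)
    else (x :: s, ans)

-- outer while loop of A: for each i push i+1, then run the inner pop loop
def solution (order : List Int) : Int :=
  ((List.range order.length).foldl
    (fun st (i : Nat) => aInner order (((i : Int) + 1) :: st.1) st.2) (([] : List Int), (0 : Int))).2

-- ===== PORT B =====
-- B's inner while loop: push next_box while next_box ≤ n and the top is not the target
def pushLoop (n t : Int) (stack : List Int) (next : Int) : List Int × Int :=
  if h : next ≤ n ∧ stack.head? ≠ some t then
    pushLoop n t (next :: stack) (next + 1)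
  else (stack, next)
termination_by (n + 1 - next).toNat
decreasing_by omega

-- B's for loop over the order targets (break = returning cnt)
def bGo (n : Int) : List Int → List Int → Int → Int → Int
  | [], _, _, cnt => cnt
  | t :: rest, stack, next, cnt =>
    if stack.head? = some t then bGo n rest stack.tail next (cnt + 1)
    else
      let p := pushLoop n t stack next
      if p.1.head? = some t then bGo n rest p.1.tail p.2 (cnt + 1)
      else cnt

def solution_alt (order : List Int) : Int :=
  bGo (order.length : Int) order [] 1 0

-- ===== PRECONDITION & SPEC =====
def Spec_solution (order : List Int) (out : Int) : Prop := out = solution_alt order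
instance (order : List Int) (out : Int) : Decidable (Spec_solution order out) := by unfold Spec_solution; infer_instance

-- ===== CLAIM (what is proved, stated in full; the proofs are below) =====
def Claim_equal_solution : Prop := ∀ (order : List Int), Dom_solution order → Spec_solution order (solution order)

-- ===== LEMMAS AND PROOFS =====

-- Reference greedy stack simulation both ports are proved equal to:
-- pop when the top matches the next target, otherwise push the next box; count the pops.
def sim : List Int → List Int → List Int → Int
  | _, _, [] => 0
  | boxes, x :: s, t :: o =>
    if x = t then 1 + sim boxes s o
    else match boxes with
      | [] => 0
      | b :: bs => sim bs (b :: x :: s) (t :: o)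
  | boxes, [], t :: o =>
    match boxes with
    | [] => 0
    | b :: bs => sim bs [b] (t :: o)
termination_by boxes stack _ => 2 * boxes.length + stack.length
decreasing_by all_goals (simp; try omega)

-- a push step of sim, available whenever the top does not match the next target
lemma sim_push (b : Int) (bs stack ord : List Int)
    (h : stack = [] ∨ stack.head? ≠ ord.head?) :
    sim (b :: bs) stack ord = sim bs (b :: stack) ord := by
  match ord, stack with
  | [], _ => simp [sim]
  | t :: o, [] => simp [sim]
  | t :: o, x :: s =>
    have hx : x ≠ t := by
      rcases h with h | h
      · exact absurd h (by simp)
      · simpa using h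
    simp [sim, hx]

-- sim returns 0 once the box supply is exhausted and the top does not match
lemma sim_nil_boxes (stack ord : List Int)
    (h : stack = [] ∨ stack.head? ≠ ord.head?) :
    sim [] stack ord = 0 := by
  match ord, stack with
  | [], _ => simp [sim]
  | t :: o, [] => simp [sim]
  | t :: o, x :: s =>
    have hx : x ≠ t := by
      rcases h with h | h
      · exact absurd h (by simp)
      · simpa using h
    simp [sim, hx]

-- A's inner pop loop realises a run of sim's pop steps and leaves a mismatching state
lemma aInner_sim (order : List Int) (stack : List Int) (ans : Nat) :
    ∃ (st' : List Int) (ans' : Nat),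
      aInner order stack (ans : Int) = (st', (ans' : Int)) ∧
      (st' = [] ∨ st'.head? ≠ (order.drop ans').head?) ∧
      ∀ boxes, sim boxes stack (order.drop ans)
        = ((ans' : Int) - (ans : Int)) + sim boxes st' (order.drop ans') := by
  induction stack generalizing ans with
  | nil => exact ⟨[], ans, rfl, Or.inl rfl, fun boxes => by simp⟩
  | cons x s ih =>
    by_cases hm : order[ans]? = some x
    · have hlt : ans < order.length := by
        exact (List.getElem?_eq_some_iff.mp hm).1
      have hx : order[ans] = x := by
        have := List.getElem?_eq_getElem hlt
        rw [this] at hm; exact Option.some.inj hm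
      have hdrop : order.drop ans = x :: order.drop (ans + 1) := by
        rw [List.drop_eq_getElem_cons hlt, hx]
      obtain ⟨st', ans', heq, hinv, hsim⟩ := ih (ans + 1)
      refine ⟨st', ans', ?_, hinv, fun boxes => ?_⟩
      · show aInner order (x :: s) (ans : Int) = _
        rw [aInner]
        rw [if_pos (by simp [hm])]
        rw [show ((ans : Int) + 1) = ((ans + 1 : Nat) : Int) by push_cast; ring]
        exact heq
      · rw [hdrop]
        show sim boxes (x :: s) (x :: order.drop (ans + 1)) = _
        rw [show sim boxes (x :: s) (x :: order.drop (ans + 1))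
            = 1 + sim boxes s (order.drop (ans + 1)) by rw [sim.eq_def]; simp]
        rw [hsim boxes]
        push_cast
        ring
    · refine ⟨x :: s, ans, ?_, ?_, fun boxes => by simp⟩
      · rw [aInner, if_neg (by simp [hm])]
      · right
        rw [List.head?_drop]
        simp only [List.head?_cons]
        exact fun hc => hm hc.symm

-- A's outer fold equals sim on the remaining boxes
lemma foldA (order : List Int) (l : List Nat) (stack : List Int) (ans : Nat)
    (h : stack = [] ∨ stack.head? ≠ (order.drop ans).head?) :
    ((l.foldl (fun st (i : Nat) => aInner order (((i : Int) + 1) :: st.1) st.2)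
        (stack, (ans : Int))).2
      = (ans : Int) + sim (l.map (fun i : Nat => ((i : Int) + 1))) stack (order.drop ans)) := by
  induction l generalizing stack ans with
  | nil =>
    show (ans : Int) = (ans : Int) + sim [] stack (order.drop ans)
    rw [sim_nil_boxes _ _ h]
    ring
  | cons i l' ih =>
    simp only [List.foldl_cons, List.map_cons]
    obtain ⟨st', ans', heq, hinv, hsim⟩ := aInner_sim order (((i : Int) + 1) :: stack) ans
    rw [heq, ih st' ans' hinv]
    rw [sim_push _ _ _ _ h, hsim]
    ring

-- the boxes numbered next..n, as Ints
def remBoxes (n next : Nat) : List Int := (List.range' next (n + 1 - next)).map Int.ofNat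

lemma remBoxes_cons {n next : Nat} (h : next ≤ n) :
    remBoxes n next = (next : Int) :: remBoxes n (next + 1) := by
  unfold remBoxes
  rw [show n + 1 - next = (n - next) + 1 by omega, List.range'_succ,
    show n + 1 - (next + 1) = n - next by omega]
  simp

lemma sim_ord_nil (boxes stack : List Int) : sim boxes stack [] = 0 := by
  rw [sim.eq_def]

-- B's push loop realises a run of sim's push steps
lemma pushLoop_sim (n : Nat) (t : Int) (fuel : Nat) (stack : List Int) (next : Nat)
    (hf : fuel = n + 1 - next) :
    ∃ (st' : List Int) (next' : Nat),
      pushLoop (n : Int) t stack (next : Int) = (st', (next' : Int)) ∧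
      (st'.head? = some t ∨ (n + 1 - next' = 0 ∧ st'.head? ≠ some t)) ∧
      ∀ o, sim (remBoxes n next) stack (t :: o) = sim (remBoxes n next') st' (t :: o) := by
  induction fuel generalizing stack next with
  | zero =>
    refine ⟨stack, next, ?_, ?_, fun o => rfl⟩
    · rw [pushLoop, dif_neg]
      rintro ⟨h1, _⟩
      have : next ≤ n := by exact_mod_cast h1
      omega
    · by_cases hh : stack.head? = some t
      · exact Or.inl hh
      · exact Or.inr ⟨by omega, hh⟩
  | succ f ihf =>
    by_cases hc : next ≤ n ∧ stack.head? ≠ some t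
    · obtain ⟨st', next', heq, hend, htrans⟩ :=
        ihf ((next : Int) :: stack) (next + 1) (by omega)
      refine ⟨st', next', ?_, hend, fun o => ?_⟩
      · rw [pushLoop, dif_pos ⟨by exact_mod_cast hc.1, hc.2⟩]
        rw [show ((next : Int) + 1) = ((next + 1 : Nat) : Int) by push_cast; ring]
        exact heq
      · rw [remBoxes_cons hc.1, sim_push _ _ _ _ (Or.inr (by simpa using hc.2))]
        exact htrans o
    · refine ⟨stack, next, ?_, ?_, fun o => rfl⟩
      · rw [pushLoop, dif_neg]
        rintro ⟨h1, h2⟩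
        exact hc ⟨by exact_mod_cast h1, h2⟩
      · by_cases hh : stack.head? = some t
        · exact Or.inl hh
        · rcases Decidable.not_and_iff_or_not.mp hc with h1 | h2
          · exact Or.inr ⟨by omega, hh⟩
          · exact absurd hh (by simpa using h2)

-- B's target loop equals sim
lemma bGo_sim (n : Nat) (targets : List Int) : ∀ (stack : List Int) (next : Nat) (cnt : Int),
    bGo (n : Int) targets stack (next : Int) cnt
      = cnt + sim (remBoxes n next) stack targets := by
  induction targets with
  | nil => intro stack next cnt; rw [bGo, sim_ord_nil]; ring
  | cons t rest ih =>
    intro stack next cnt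
    rw [bGo]
    by_cases hh : stack.head? = some t
    · obtain ⟨x, s, rfl⟩ : ∃ x s, stack = x :: s := by
        cases stack with
        | nil => simp at hh
        | cons a b => exact ⟨a, b, rfl⟩
      have hx : x = t := by simpa using hh
      rw [if_pos hh, List.tail_cons, ih]
      subst hx
      rw [show sim (remBoxes n next) (x :: s) (x :: rest)
          = 1 + sim (remBoxes n next) s rest by rw [sim.eq_def]; simp]
      ring
    · rw [if_neg hh]
      obtain ⟨st', next', heq, hend, htrans⟩ := pushLoop_sim n t (n + 1 - next) stack next rfl
      simp only [heq, htrans rest]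
      rcases hend with hm | ⟨hz, hne⟩
      · obtain ⟨s', rfl⟩ : ∃ s', st' = t :: s' := by
          cases st' with
          | nil => simp at hm
          | cons a b =>
            have ha : a = t := by simpa using hm
            exact ⟨b, by rw [ha]⟩
        rw [if_pos (by simp), List.tail_cons, ih]
        rw [show sim (remBoxes n next') (t :: s') (t :: rest)
            = 1 + sim (remBoxes n next') s' rest by rw [sim.eq_def]; simp]
        ring
      · rw [if_neg hne]
        have hrb : remBoxes n next' = [] := by
          unfold remBoxes; rw [hz]; rfl
        rw [hrb, sim_nil_boxes _ _ (Or.inr (by simpa using hne))]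
        ring

lemma remBoxes_one (n : Nat) :
    remBoxes n 1 = (List.range n).map (fun i : Nat => ((i : Int) + 1)) := by
  unfold remBoxes
  rw [show n + 1 - 1 = n by omega, List.range'_eq_map_range, List.map_map]
  exact List.map_congr_left (fun i _ => by simp [Int.ofNat_eq_natCast]; ring)

-- ===== VERDICT (by name: the statement is the Claim_ definition above) =====
theorem solution_spec : Claim_equal_solution := by
  intro order _
  unfold Spec_solution solution solution_alt
  have hA := foldA order (List.range order.length) [] 0 (Or.inl rfl)
  have hB := bGo_sim order.length order [] 1 0
  rw [List.drop_zero] at hA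
  rw [show ((0:Nat):Int) = 0 from rfl] at hA
  rw [show ((1:Nat):Int) = 1 from rfl] at hB
  rw [hA, hB, remBoxes_one]
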